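-- pv_equiv track=rewrite | github.com/diegomm6/lr-fhss_seq-families | main.py | sigma_transform
-- ===== SOURCE A (Python) =====
-- def sigma_transform(X, p, k):
--
--     Y = []
--     q = len(X)
--     for j in range(q):
--
--         y_j = 0
--         for i in range(k):
--             y_j += X[(j+i) % q] * p**i
--
--         Y.append(y_j)
--
--     return Y
-- ===== SOURCE B (Python) =====
-- def sigma_transform(X, p, k):
--     q = len(X)
--     if q == 0:
--         return []
--     if k <= 0:
--         return [0] * q
--     pk = p ** k
--     # last window directly, then slide backwards: y_j = X[j] + p*y_{j+1} - p^k * X[(j+k)%q]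
--     y = 0
--     for i in range(k - 1, -1, -1):
--         y = X[(q - 1 + i) % q] * p ** i + y
--     ys = [y]
--     for j in range(q - 2, -1, -1):
--         y = X[j] + p * y - pk * X[(j + k) % q]
--         ys.append(y)
--     ys.reverse()
--     return ys
-- ===== Notes on version B (the rewrite author's own statement) =====
-- stated objective: faster
-- what changed: Replaces the O(q*k) per-window summation with a backward sliding-window recurrence y_j = X[j] + p*y_{j+1} - p^k*X[(j+k)%q]: only the last window is summed directly, every other window is derived in O(1) from its successor, giving O(q+k) ring operations.
import Mathlib
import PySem

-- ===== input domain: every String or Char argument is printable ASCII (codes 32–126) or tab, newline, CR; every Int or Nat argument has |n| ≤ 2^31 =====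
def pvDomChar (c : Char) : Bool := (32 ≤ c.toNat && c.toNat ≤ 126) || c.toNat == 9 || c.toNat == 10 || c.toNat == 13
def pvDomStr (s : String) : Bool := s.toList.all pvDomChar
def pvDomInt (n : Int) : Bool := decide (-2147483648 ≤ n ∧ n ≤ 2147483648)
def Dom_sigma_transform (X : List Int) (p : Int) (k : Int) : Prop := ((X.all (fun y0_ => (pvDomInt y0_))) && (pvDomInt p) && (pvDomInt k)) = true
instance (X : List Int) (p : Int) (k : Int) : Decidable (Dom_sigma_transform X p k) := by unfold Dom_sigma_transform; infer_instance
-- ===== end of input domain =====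

-- B replaces A's window-by-window summation with a backward sliding-window recurrence
-- y_j = X[j] + p*y_{j+1} - p^k*X[(j+k)%q], reusing the previous window value (objective: faster).

-- ===== PORT A =====
-- for j in range(q): y_j = sum over i in range(k) of X[(j+i)%q] * p**i; Y.append(y_j)
def sigma_transform (X : List Int) (p : Int) (k : Int) : List Int :=
  let q : Int := X.length
  (PySem.List.pyRange 0 q 1).foldl (fun Y j =>
    let y_j := (PySem.List.pyRange 0 k 1).foldl (fun acc i =>
      acc + PySem.List.pyGetD X (PySem.Int.mod (j + i) q) 0 * p ^ i.toNat) 0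
    Y ++ [y_j]) []

-- ===== PORT B =====
-- last window computed directly, then the loop slides it backwards; ys.append + reverse at the end
def sigma_transform_alt (X : List Int) (p : Int) (k : Int) : List Int :=
  let q : Int := X.length
  if q == 0 then []
  else if k ≤ 0 then List.replicate q.toNat 0
  else
    let pk := p ^ k.toNat
    let y0 := (PySem.List.pyRange (k - 1) (-1) (-1)).foldl (fun y i =>
      PySem.List.pyGetD X (PySem.Int.mod (q - 1 + i) q) 0 * p ^ i.toNat + y) 0
    let st := (PySem.List.pyRange (q - 2) (-1) (-1)).foldl (fun (st : Int × List Int) j =>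
      let y := PySem.List.pyGetD X j 0 + p * st.1 - pk * PySem.List.pyGetD X (PySem.Int.mod (j + k) q) 0
      (y, st.2 ++ [y])) (y0, [y0])
    st.2.reverse

-- ===== PRECONDITION & SPEC =====
def Spec_sigma_transform (X : List Int) (p : Int) (k : Int) (out : List Int) : Prop := out = sigma_transform_alt X p k
instance (X : List Int) (p : Int) (k : Int) (out : List Int) : Decidable (Spec_sigma_transform X p k out) := by unfold Spec_sigma_transform; infer_instance

-- ===== CLAIM (what is proved, stated in full; the proofs are below) =====
def Claim_equal_sigma_transform : Prop := ∀ (X : List Int) (p : Int) (k : Int), Dom_sigma_transform X p k → Spec_sigma_transform X p k (sigma_transform X p k)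

-- ===== LEMMAS AND PROOFS =====

-- the mathematical window value both programs compute: Y[j] = sum_{i<k} X[(j+i)%q] * p^i
def pvWin (X : List Int) (p : Int) (kn : Nat) (j : Nat) : Int :=
  ∑ i ∈ Finset.range kn, X.getD ((j + i) % X.length) 0 * p ^ i

-- Port A computes the windows one by one
lemma sigma_transform_eq_map (X : List Int) (p : Int) (k : Int) :
    sigma_transform X p k = (List.range X.length).map (pvWin X p k.toNat) := by
  unfold sigma_transform
  dsimp only
  rw [PySem.List.pyRange_one 0 (X.length : Int)]
  rw [List.foldl_map, PySem.List.foldl_append_singleton_eq_map]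
  simp only [Int.sub_zero, Int.toNat_natCast, List.nil_append]
  apply List.map_congr_left
  intro jn hjn
  rw [PySem.List.pyRange_one 0 k, List.foldl_map]
  rw [PySem.List.foldl_add]
  simp only [Int.zero_add]
  unfold pvWin
  simp only [Int.sub_zero]
  show _ = ((List.range k.toNat).map (fun i => X.getD ((jn + i) % X.length) 0 * p ^ i)).sum
  congr 1
  apply List.map_congr_left
  intro i hi
  have h1 : ((jn:Int) + (i:Int)) = ((jn + i : Nat) : Int) := by push_cast; ring
  rw [h1, PySem.Int.mod_natCast, PySem.List.pyGetD_natCast]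
  simp

-- sliding-window recurrence: the window at j from the window at j+1
lemma pvWin_rec (X : List Int) (p : Int) (m j : Nat) (hj : j < X.length) :
    pvWin X p (m + 1) j
      = X.getD j 0 + p * pvWin X p (m + 1) (j + 1)
        - p ^ (m + 1) * X.getD ((j + (m + 1)) % X.length) 0 := by
  unfold pvWin
  have hsum : p * ∑ i ∈ Finset.range (m+1), X.getD ((j+1+i) % X.length) 0 * p ^ i
      = (∑ i ∈ Finset.range m, X.getD ((j+(i+1)) % X.length) 0 * p ^ (i+1))
        + X.getD ((j+(m+1)) % X.length) 0 * p ^ (m+1) := by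
    rw [Finset.sum_range_succ, mul_add, Finset.mul_sum]
    congr 1
    · apply Finset.sum_congr rfl
      intro i _
      have h : j+1+i = j+(i+1) := by omega
      rw [h]; ring
    · have h : j+1+m = j+(m+1) := by omega
      rw [h]; ring
  rw [Finset.sum_range_succ' (fun i => X.getD ((j+i) % X.length) 0 * p ^ i) m, hsum]
  simp [Nat.mod_eq_of_lt hj]
  ring

-- the backward loop of port B, as an invariant on the descending range
lemma sigma_alt_desc (X : List Int) (p : Int) (kn : Nat) (hk : 1 ≤ kn)
    (m : Nat) (hm : m < X.length) (acc : List Int) :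
    (PySem.List.pyRange ((m : Int) - 1) (-1) (-1)).foldl (fun (st : Int × List Int) j =>
        let y := PySem.List.pyGetD X j 0 + p * st.1
          - p ^ kn * PySem.List.pyGetD X (PySem.Int.mod (j + (kn : Int)) (X.length : Int)) 0
        (y, st.2 ++ [y])) (pvWin X p kn m, acc)
      = (pvWin X p kn 0, acc ++ ((List.range m).map (pvWin X p kn)).reverse) := by
  induction m generalizing acc with
  | zero =>
    rw [show ((0:Nat):Int) - 1 = -1 by ring, PySem.List.pyRange_neg_one_eq_nil (by omega)]
    simp
  | succ m ih =>
    rw [show ((m+1:Nat):Int) - 1 = (m:Int) by push_cast; ring,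
        PySem.List.pyRange_neg_one_cons (by omega)]
    rw [List.foldl_cons]
    obtain ⟨s, rfl⟩ : ∃ s, kn = s + 1 := ⟨kn - 1, by omega⟩
    have hy : PySem.List.pyGetD X (m:Int) 0 + p * pvWin X p (s+1) (m+1)
        - p ^ (s+1) * PySem.List.pyGetD X (PySem.Int.mod ((m:Int) + ((s+1:Nat):Int)) (X.length : Int)) 0
        = pvWin X p (s+1) m := by
      have harg : ((m:Int) + ((s+1:Nat):Int)) = ((m + (s+1) : Nat) : Int) := by push_cast; ring
      rw [harg, PySem.Int.mod_natCast, PySem.List.pyGetD_natCast, PySem.List.pyGetD_natCast,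
          pvWin_rec X p s m (by omega)]
    dsimp only
    rw [hy, ih (by omega)]
    simp [List.range_succ]

-- the initial window y0 of port B equals the last window value
lemma sigma_alt_y0 (X : List Int) (p : Int) (k : Int) (hq : X ≠ []) (hk : 1 ≤ k) :
    (PySem.List.pyRange (k - 1) (-1) (-1)).foldl (fun y i =>
      PySem.List.pyGetD X (PySem.Int.mod ((X.length : Int) - 1 + i) (X.length : Int)) 0
        * p ^ i.toNat + y) 0
      = pvWin X p k.toNat (X.length - 1) := by
  have hlen : 1 ≤ X.length := List.length_pos_iff.mpr hq
  rw [PySem.List.pyRange_neg_one]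
  rw [show (k - 1 - (-1)).toNat = k.toNat by omega]
  rw [List.foldl_map]
  rw [show List.foldl (fun (x : Int) (y : Nat) =>
        PySem.List.pyGetD X (PySem.Int.mod ((X.length : Int) - 1 + (k - 1 - (y:Int))) (X.length : Int)) 0
          * p ^ (k - 1 - (y:Int)).toNat + x) 0 (List.range k.toNat)
      = List.foldl (fun (y : Int) (iN : Nat) =>
        y + X.getD ((X.length - 1 + (k.toNat - 1 - iN)) % X.length) 0 * p ^ (k.toNat - 1 - iN))
        0 (List.range k.toNat) from
    PySem.List.foldl_congr_mem _ _ _ _ (by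
      intro acc x hx
      have hxk : x < k.toNat := List.mem_range.mp hx
      have h2 : (k - 1 - (x:Int)) = ((k.toNat - 1 - x : Nat) : Int) := by omega
      have h3 : ((X.length : Int) - 1 + ((k.toNat - 1 - x : Nat) : Int))
          = ((X.length - 1 + (k.toNat - 1 - x) : Nat) : Int) := by omega
      rw [h2, h3, PySem.Int.mod_natCast, PySem.List.pyGetD_natCast]
      simp [add_comm])]
  rw [PySem.List.foldl_add]
  rw [zero_add]
  show (∑ i ∈ Finset.range k.toNat,
      X.getD ((X.length - 1 + (k.toNat - 1 - i)) % X.length) 0 * p ^ (k.toNat - 1 - i)) = _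
  rw [Finset.sum_range_reflect (fun i => X.getD ((X.length - 1 + i) % X.length) 0 * p ^ i) k.toNat]
  rfl

-- Port B computes the same list of windows
lemma sigma_alt_eq_map (X : List Int) (p : Int) (k : Int) :
    sigma_transform_alt X p k = (List.range X.length).map (pvWin X p k.toNat) := by
  unfold sigma_transform_alt
  dsimp only
  by_cases hq : X = []
  · subst hq; simp
  have hlen : 1 ≤ X.length := List.length_pos_iff.mpr hq
  rw [if_neg (by simp; omega)]
  by_cases hk : k ≤ 0
  · rw [if_pos hk]
    have hkn : k.toNat = 0 := by omega
    have h0 : pvWin X p 0 = fun _ => 0 := by funext j; simp [pvWin]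
    rw [hkn, h0, List.map_const', List.length_range, Int.toNat_natCast]
  rw [if_neg hk]
  rw [sigma_alt_y0 X p k hq (by omega)]
  rw [show ((X.length : Int) - 2) = ((X.length - 1 : Nat) : Int) - 1 by omega]
  rw [show k = ((k.toNat : Nat) : Int) by omega]
  simp only [Int.toNat_natCast]
  rw [sigma_alt_desc X p k.toNat (by omega) (X.length - 1) (by omega) [pvWin X p k.toNat (X.length - 1)]]
  rw [List.reverse_append, List.reverse_reverse, List.reverse_singleton]
  rw [show X.length = (X.length - 1) + 1 by omega, List.range_succ]
  simp

-- ===== VERDICT (by name: the statement is the Claim_ definition above) =====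
theorem sigma_transform_spec : Claim_equal_sigma_transform := by
  intro X p k _
  unfold Spec_sigma_transform
  rw [sigma_transform_eq_map, sigma_alt_eq_map]
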